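-- pv_equiv track=rewrite | github.com/Ben020919/Letech | backend/services/yummy_api.py | check_data_status
-- ===== SOURCE A (Python) =====
-- def check_data_status(data_dict):
--     if not data_dict: return 'empty'
--     food_keywords = ['ingredient', 'energy', 'protein', 'fat', 'carb', 'sodium', 'serving']
--     for k, v in data_dict.items():
--         if any(fw in str(k).lower() for fw in food_keywords):
--             val = str(v).strip().lower()
--             if val and val not in ['nan', '0', 'none', '']: return 'food'
--     for k, v in data_dict.items():
--         if any(cw in str(k).lower() for cw in ['caution', 'warning']):
--             val = str(v).strip().lower()
--             if val and val not in ['nan', 'none', '']: return 'caution'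
--     return 'empty'
-- ===== SOURCE B (Python) =====
-- FOOD_KEYWORDS = ['ingredient', 'energy', 'protein', 'fat', 'carb', 'sodium', 'serving']
-- CAUTION_KEYWORDS = ['caution', 'warning']
--
-- def check_data_status(data_dict):
--     # single pass: return 'food' immediately, remember caution hits for the end
--     if not data_dict:
--         return 'empty'
--     caution_found = False
--     for k, v in data_dict.items():
--         key = str(k).lower()
--         val = str(v).strip().lower()
--         if any(fw in key for fw in FOOD_KEYWORDS):
--             if val and val not in ('nan', '0', 'none', ''):
--                 return 'food'
--         if not caution_found and any(cw in key for cw in CAUTION_KEYWORDS):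
--             if val and val not in ('nan', 'none', ''):
--                 caution_found = True
--     return 'caution' if caution_found else 'empty'
-- ===== Notes on version B (the rewrite author's own statement) =====
-- stated objective: alternative
-- what changed: Replaced A's two full scans of the dict (one for food keys, then one for caution keys) by a single stateful pass that returns 'food' early and defers 'caution' via a flag; priority is preserved because a food hit anywhere outranks any caution hit.
import Mathlib
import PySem

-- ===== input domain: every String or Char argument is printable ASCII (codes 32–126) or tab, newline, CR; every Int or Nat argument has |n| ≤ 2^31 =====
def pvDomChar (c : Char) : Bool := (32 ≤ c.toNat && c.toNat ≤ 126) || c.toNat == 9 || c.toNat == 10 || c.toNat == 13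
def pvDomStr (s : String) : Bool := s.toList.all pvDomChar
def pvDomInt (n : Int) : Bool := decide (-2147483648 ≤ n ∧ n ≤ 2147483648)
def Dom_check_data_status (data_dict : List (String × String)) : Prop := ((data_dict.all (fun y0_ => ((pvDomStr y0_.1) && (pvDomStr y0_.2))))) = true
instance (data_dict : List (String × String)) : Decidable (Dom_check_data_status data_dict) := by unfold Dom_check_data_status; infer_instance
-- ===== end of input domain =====

-- B replaces A's two full scans by one stateful pass (early 'food' return, deferred 'caution' flag); alternative decomposition, same cost.

-- shared key/value predicates (identical literal tests in both Pythons)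
def foodKeywords : List String := ["ingredient", "energy", "protein", "fat", "carb", "sodium", "serving"]

def foodKey (k : String) : Bool := foodKeywords.any (fun fw => PySem.Str.isIn fw (PySem.Str.lower k))

def foodVal (v : String) : Bool :=
  let val := PySem.Str.lower (PySem.Str.strip v)
  val ≠ "" && !(["nan", "0", "none", ""].contains val)

def cautionKey (k : String) : Bool := (["caution", "warning"] : List String).any (fun cw => PySem.Str.isIn cw (PySem.Str.lower k))

def cautionVal (v : String) : Bool :=
  let val := PySem.Str.lower (PySem.Str.strip v)
  val ≠ "" && !(["nan", "none", ""].contains val)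

-- ===== PORT A =====
-- A's first loop: does any entry have a food keyword in the key and a qualifying value?
def aFoodScan : List (String × String) → Bool
  | [] => false
  | (k, v) :: t => if foodKey k && foodVal v then true else aFoodScan t

-- A's second loop
def aCautionScan : List (String × String) → Bool
  | [] => false
  | (k, v) :: t => if cautionKey k && cautionVal v then true else aCautionScan t

def check_data_status (data_dict : List (String × String)) : String :=
  if data_dict = [] then "empty"
  else if aFoodScan data_dict then "food"
  else if aCautionScan data_dict then "caution"
  else "empty"

-- ===== PORT B =====
-- single pass with a caution flag
def bLoop : List (String × String) → Bool → String
  | [], flag => if flag then "caution" else "empty"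
  | (k, v) :: t, flag =>
      if foodKey k && foodVal v then "food"
      else bLoop t (flag || (cautionKey k && cautionVal v))

def check_data_status_alt (data_dict : List (String × String)) : String :=
  if data_dict = [] then "empty" else bLoop data_dict false

-- ===== PRECONDITION & SPEC =====
def Spec_check_data_status (data_dict : List (String × String)) (out : String) : Prop := out = check_data_status_alt data_dict
instance (data_dict : List (String × String)) (out : String) : Decidable (Spec_check_data_status data_dict out) := by unfold Spec_check_data_status; infer_instance

-- ===== CLAIM (what is proved, stated in full; the proofs are below) =====
def Claim_equal_check_data_status : Prop := ∀ (data_dict : List (String × String)), Dom_check_data_status data_dict → Spec_check_data_status data_dict (check_data_status data_dict)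

-- ===== LEMMAS AND PROOFS =====
-- B's loop in terms of A's two scans
theorem bLoop_eq (l : List (String × String)) (flag : Bool) :
    bLoop l flag = if aFoodScan l then "food"
                   else if flag || aCautionScan l then "caution" else "empty" := by
  induction l generalizing flag with
  | nil => simp [bLoop, aFoodScan, aCautionScan]
  | cons h t ih =>
      obtain ⟨k, v⟩ := h
      by_cases hf : (foodKey k && foodVal v) = true
      · simp [bLoop, aFoodScan, aCautionScan, hf]
      · cases hc : cautionKey k && cautionVal v <;>
          simp [bLoop, aFoodScan, aCautionScan, hf, hc, ih, Bool.or_comm]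

-- ===== VERDICT (by name: the statement is the Claim_ definition above) =====
theorem check_data_status_spec : Claim_equal_check_data_status := by
  intro l _
  unfold Spec_check_data_status check_data_status check_data_status_alt
  cases l with
  | nil => rfl
  | cons h t => simp [bLoop_eq]
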